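-- pv_equiv track=rewrite | github.com/AnonymousUser530/HERAKLES | results_analysis_DLP_textcrafter.py | filtration_high_level_action
-- ===== SOURCE A (Python) =====
-- def filtration_high_level_action(action_list, high_level_action_list):
--     new_high_level_action_list = []
--     switch=True
--     for tk, act in zip(action_list, high_level_action_list):
--         if switch:
--             new_high_level_action_list.append(act)
--             switch=False
--         if tk==2:
--             switch=True
--     return new_high_level_action_list
-- ===== SOURCE B (Python) =====
-- def filtration_high_level_action(action_list, high_level_action_list):
--     n = min(len(action_list), len(high_level_action_list))
--     starts = [0] + [i + 1 for i in range(n) if action_list[i] == 2]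
--     return [high_level_action_list[s] for s in starts if s < n]
-- ===== Notes on version B (the rewrite author's own statement) =====
-- stated objective: alternative
-- what changed: Replaces the running switch flag with an explicit segment-start index table ([0] plus each position after a 2) followed by a second gather pass over those indices.
import Mathlib
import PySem

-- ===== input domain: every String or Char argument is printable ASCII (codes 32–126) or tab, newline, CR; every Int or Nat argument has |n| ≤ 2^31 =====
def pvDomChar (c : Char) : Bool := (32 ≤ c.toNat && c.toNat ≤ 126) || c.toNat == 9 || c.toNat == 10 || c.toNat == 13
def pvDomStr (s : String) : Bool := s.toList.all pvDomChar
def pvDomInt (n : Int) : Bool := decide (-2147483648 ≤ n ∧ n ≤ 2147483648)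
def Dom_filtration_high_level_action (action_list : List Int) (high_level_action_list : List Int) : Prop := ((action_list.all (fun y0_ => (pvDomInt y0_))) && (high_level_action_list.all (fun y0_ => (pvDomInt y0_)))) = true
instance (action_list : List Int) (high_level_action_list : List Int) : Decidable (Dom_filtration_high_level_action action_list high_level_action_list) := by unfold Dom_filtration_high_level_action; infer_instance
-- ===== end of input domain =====

-- B replaces A's running switch flag with an explicit segment-start index table and a
-- gather pass (objective: alternative decomposition, same cost).

-- ===== PORT A =====
-- the for-loop of A: state = (switch, accumulator); literal step order kept
def fhlaGo : List (Int × Int) → Bool → List Int → List Int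
  | [], _, acc => acc
  | (tk, act) :: rest, switch, acc =>
      let acc' := if switch then acc ++ [act] else acc
      let switch' := if switch then false else switch
      let switch'' := if tk = 2 then true else switch'
      fhlaGo rest switch'' acc'

def filtration_high_level_action (action_list : List Int) (high_level_action_list : List Int) : List Int :=
  fhlaGo (action_list.zip high_level_action_list) true []

-- ===== PORT B =====
def filtration_high_level_action_alt (action_list : List Int) (high_level_action_list : List Int) : List Int :=
  let n := min action_list.length high_level_action_list.length
  let starts := 0 :: (((List.range n).filter (fun i => action_list.getD i 0 == 2)).map (· + 1))
  (starts.filter (fun s => decide (s < n))).map (fun s => high_level_action_list.getD s 0)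

-- ===== PRECONDITION & SPEC =====
def Spec_filtration_high_level_action (action_list : List Int) (high_level_action_list : List Int) (out : List Int) : Prop := out = filtration_high_level_action_alt action_list high_level_action_list
instance (action_list : List Int) (high_level_action_list : List Int) (out : List Int) : Decidable (Spec_filtration_high_level_action action_list high_level_action_list out) := by unfold Spec_filtration_high_level_action; infer_instance

-- ===== CLAIM (what is proved, stated in full; the proofs are below) =====
def Claim_equal_filtration_high_level_action : Prop := ∀ (action_list : List Int) (high_level_action_list : List Int), Dom_filtration_high_level_action action_list high_level_action_list → Spec_filtration_high_level_action action_list high_level_action_list (filtration_high_level_action action_list high_level_action_list)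

-- ===== LEMMAS AND PROOFS =====
-- accumulator lemma for A's loop
theorem fhlaGo_acc (l : List (Int × Int)) (sw : Bool) (acc : List Int) :
    fhlaGo l sw acc = acc ++ fhlaGo l sw [] := by
  induction l generalizing sw acc with
  | nil => simp [fhlaGo]
  | cons p rest ih =>
    obtain ⟨tk, act⟩ := p
    cases sw <;> simp only [fhlaGo, if_true]
    · exact ih _ _
    · rw [ih _ (acc ++ [act]), ih _ ([] ++ [act])]
      simp

-- gathering over indices shifted by one skips the head of the value list
theorem gather_shift (h0 : Int) (h' : List Int) (na nh : Nat) (L : List Nat) :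
    (((L.map (fun x => x + 1)).filter (fun s => decide (s ≤ na) && decide (s ≤ nh))).map
        (fun s => (h0 :: h').getD s 0)) =
      ((L.filter (fun s => decide (s < na) && decide (s < nh))).map (fun s => h'.getD s 0)) := by
  rw [List.filter_map, List.map_map]
  simp [Function.comp_def]

-- main invariant: A's loop from state sw equals B's gather with optional start 0
theorem fhla_main (a h : List Int) (sw : Bool) :
    fhlaGo (a.zip h) sw [] =
      (((if sw then [0] else []) ++
          (((List.range (min a.length h.length)).filter (fun i => a.getD i 0 == 2)).map (· + 1))).filter
          (fun s => decide (s < min a.length h.length))).map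
        (fun s => h.getD s 0) := by
  induction a generalizing h sw with
  | nil => cases sw <;> simp [fhlaGo]
  | cons a0 a' ih =>
    cases h with
    | nil => cases sw <;> simp [fhlaGo]
    | cons h0 h' =>
      simp only [List.zip_cons_cons, fhlaGo]
      rw [fhlaGo_acc]
      by_cases ha : a0 = 2 <;> cases sw <;>
        simp [ha, ih h' true, ih h' false, List.length_cons, Nat.succ_min_succ,
          List.range_succ_eq_map, List.filter_map, Function.comp_def] <;>
        simpa [List.map_map, Function.comp_def] using
          (gather_shift h0 h' a'.length h'.length
            (0 :: ((List.range (min a'.length h'.length)).filter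
              (fun i => a'.getD i 0 == 2)).map (fun x => x + 1))).symm

-- ===== VERDICT (by name: the statement is the Claim_ definition above) =====
theorem filtration_high_level_action_spec : Claim_equal_filtration_high_level_action := by
  intro a h _
  unfold Spec_filtration_high_level_action filtration_high_level_action filtration_high_level_action_alt
  simpa using fhla_main a h true
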